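-- pv_equiv track=rewrite | github.com/lydxlx1/LeetCode | src/_2549.py | distinctIntegers
-- ===== SOURCE A (Python) =====
-- def distinctIntegers(n: int) -> int:
--     nums = {n}
--     while True:
--         new_nums = set(nums)
--         for x in nums:
--             for i in range(1, n + 1):
--                 if x % i == 1:
--                     new_nums.add(i)
--         if len(new_nums) > len(nums):
--             nums = new_nums
--         else:
--             break
--     return len(nums)
-- ===== SOURCE B (Python) =====
-- def distinctIntegers(n: int) -> int:
--     # Closed form: the reachable set is exactly {2..n} for n >= 2 (size n-1),
--     # and just {n} itself otherwise (size 1).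
--     return n - 1 if n >= 2 else 1
-- ===== Notes on version B (the rewrite author's own statement) =====
-- stated objective: faster
-- what changed: A's fixpoint iteration (repeatedly scanning every reached x against every i in 1..n until the set stops growing) is replaced by the closed form: the reachable set is exactly {2..n} for n >= 2, so return n-1, and 1 otherwise.
import Mathlib
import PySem

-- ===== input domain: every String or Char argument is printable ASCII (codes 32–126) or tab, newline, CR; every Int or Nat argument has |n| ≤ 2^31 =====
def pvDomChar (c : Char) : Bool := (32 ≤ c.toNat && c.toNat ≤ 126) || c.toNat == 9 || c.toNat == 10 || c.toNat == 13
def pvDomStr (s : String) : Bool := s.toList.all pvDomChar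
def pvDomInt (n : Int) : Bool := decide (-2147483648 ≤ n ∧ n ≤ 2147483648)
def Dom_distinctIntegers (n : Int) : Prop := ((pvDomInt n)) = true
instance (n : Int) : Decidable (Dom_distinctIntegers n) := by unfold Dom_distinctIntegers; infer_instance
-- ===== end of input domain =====

-- B replaces A's fixpoint iteration over growing sets by the closed form (n-1 for n ≥ 2, else 1); objective: faster.

-- ===== PORT A =====
-- inner 'for i in range(1, n + 1): if x % i == 1: new_nums.add(i)'
def pvInner (n x : Int) (s : PySem.Set Int) : PySem.Set Int :=
  (PySem.List.pyRange 1 (n + 1) 1).foldl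
    (fun acc i => if PySem.Int.mod x i = 1 then PySem.Set.add acc i else acc) s

-- one pass of the 'while True' body: new_nums = set(nums); for x in nums: …
def pvBody (n : Int) (nums : PySem.Set Int) : PySem.Set Int :=
  nums.foldl (fun acc x => pvInner n x acc) (PySem.Set.ofList nums)

-- the 'while True' loop; fuel n.toNat + 1 provably suffices (the set grows each
-- continuing iteration and stays inside {2..n} ∪ {n}), so the fuel case is never hit.
def pvLoop (fuel : Nat) (n : Int) (nums : PySem.Set Int) : Int :=
  match fuel with
  | 0 => (nums.length : Int)
  | fuel + 1 =>
    let new := pvBody n nums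
    if nums.length < new.length then pvLoop fuel n new else (nums.length : Int)

def distinctIntegers (n : Int) : Int :=
  pvLoop (n.toNat + 1) n (PySem.Set.ofList [n])

-- ===== PORT B =====
def distinctIntegers_alt (n : Int) : Int :=
  if 2 ≤ n then n - 1 else 1

-- ===== PRECONDITION & SPEC =====
def Spec_distinctIntegers (n : Int) (out : Int) : Prop := out = distinctIntegers_alt n
instance (n : Int) (out : Int) : Decidable (Spec_distinctIntegers n out) := by unfold Spec_distinctIntegers; infer_instance

-- ===== CLAIM (what is proved, stated in full; the proofs are below) =====
def Claim_equal_distinctIntegers : Prop := ∀ (n : Int), Dom_distinctIntegers n → Spec_distinctIntegers n (distinctIntegers n)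

-- ===== LEMMAS AND PROOFS =====

theorem mem_foldl_if_add (x : Int) (l : List Int) (s : PySem.Set Int) (a : Int) :
    a ∈ l.foldl (fun acc i => if PySem.Int.mod x i = 1 then PySem.Set.add acc i else acc) s ↔
      a ∈ s ∨ (a ∈ l ∧ PySem.Int.mod x a = 1) := by
  induction l generalizing s with
  | nil => simp
  | cons i l ih =>
    simp only [List.foldl_cons, ih, List.mem_cons]
    by_cases h : PySem.Int.mod x i = 1
    · rw [if_pos h]
      simp only [PySem.Set.mem_add]
      constructor
      · rintro ((hs | rfl) | ⟨hl, hm⟩)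
        · exact Or.inl hs
        · exact Or.inr ⟨Or.inl rfl, h⟩
        · exact Or.inr ⟨Or.inr hl, hm⟩
      · rintro (hs | ⟨(rfl | hl), hm⟩)
        · exact Or.inl (Or.inl hs)
        · exact Or.inl (Or.inr rfl)
        · exact Or.inr ⟨hl, hm⟩
    · rw [if_neg h]
      constructor
      · rintro (hs | ⟨hl, hm⟩)
        · exact Or.inl hs
        · exact Or.inr ⟨Or.inr hl, hm⟩
      · rintro (hs | ⟨(rfl | hl), hm⟩)
        · exact Or.inl hs
        · exact absurd hm h
        · exact Or.inr ⟨hl, hm⟩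

theorem nodup_foldl_if_add (x : Int) (l : List Int) (s : PySem.Set Int) (hs : s.Nodup) :
    (l.foldl (fun acc i => if PySem.Int.mod x i = 1 then PySem.Set.add acc i else acc) s).Nodup := by
  induction l generalizing s with
  | nil => exact hs
  | cons i l ih =>
    simp only [List.foldl_cons]
    apply ih
    split
    · exact PySem.Set.nodup_add _ _ hs
    · exact hs

theorem mem_pvInner (n x : Int) (s : PySem.Set Int) (a : Int) :
    a ∈ pvInner n x s ↔ a ∈ s ∨ (1 ≤ a ∧ a < n + 1 ∧ PySem.Int.mod x a = 1) := by
  unfold pvInner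
  rw [mem_foldl_if_add, PySem.List.mem_pyRange_one]
  tauto

theorem mem_foldl_pvInner (n : Int) (l : List Int) (s : PySem.Set Int) (a : Int) :
    a ∈ l.foldl (fun acc x => pvInner n x acc) s ↔
      a ∈ s ∨ ∃ x ∈ l, 1 ≤ a ∧ a < n + 1 ∧ PySem.Int.mod x a = 1 := by
  induction l generalizing s with
  | nil => simp
  | cons y l ih =>
    simp only [List.foldl_cons, ih, mem_pvInner, List.mem_cons]
    constructor
    · rintro ((hs | h) | ⟨x, hx, h⟩)
      · exact Or.inl hs
      · exact Or.inr ⟨y, Or.inl rfl, h⟩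
      · exact Or.inr ⟨x, Or.inr hx, h⟩
    · rintro (hs | ⟨x, (rfl | hx), h⟩)
      · exact Or.inl (Or.inl hs)
      · exact Or.inl (Or.inr h)
      · exact Or.inr ⟨x, hx, h⟩

theorem mem_pvBody (n : Int) (nums : PySem.Set Int) (a : Int) :
    a ∈ pvBody n nums ↔ a ∈ nums ∨ ∃ x ∈ nums, 1 ≤ a ∧ a < n + 1 ∧ PySem.Int.mod x a = 1 := by
  unfold pvBody
  rw [mem_foldl_pvInner, PySem.Set.mem_ofList]

theorem nodup_pvBody (n : Int) (nums : PySem.Set Int) : (pvBody n nums).Nodup := by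
  unfold pvBody
  have : ∀ (l : List Int) (s : PySem.Set Int), s.Nodup →
      (l.foldl (fun acc x => pvInner n x acc) s).Nodup := by
    intro l
    induction l with
    | nil => intro s hs; exact hs
    | cons y l ih =>
      intro s hs
      simp only [List.foldl_cons]
      exact ih _ (nodup_foldl_if_add y _ s hs)
  exact this nums _ (PySem.Set.nodup_ofList nums)

theorem length_le_of_bounded (n : Int) (hn : 1 ≤ n) (s : List Int) (hnd : s.Nodup)
    (hb : ∀ a ∈ s, 2 ≤ a ∧ a ≤ n) : (s.length : Int) ≤ n - 1 := by
  have h1 : s.toFinset.card = s.length := List.toFinset_card_of_nodup hnd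
  have h2 : s.toFinset ⊆ Finset.Icc 2 n := by
    intro a ha
    rw [List.mem_toFinset] at ha
    have := hb a ha
    rw [Finset.mem_Icc]
    omega
  have h3 := Finset.card_le_card h2
  rw [Int.card_Icc] at h3
  omega

theorem mem_iff_of_subset_length (s t : List Int) (hs : s.Nodup) (ht : t.Nodup)
    (hsub : ∀ a ∈ s, a ∈ t) (hlen : t.length ≤ s.length) : ∀ a, a ∈ t ↔ a ∈ s := by
  have h1 : s.toFinset ⊆ t.toFinset := by
    intro a ha
    rw [List.mem_toFinset] at ha ⊢
    exact hsub a ha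
  have h2 : s.toFinset = t.toFinset := by
    apply Finset.eq_of_subset_of_card_le h1
    rw [List.toFinset_card_of_nodup hs, List.toFinset_card_of_nodup ht]
    exact hlen
  intro a
  rw [← List.mem_toFinset, ← List.mem_toFinset, h2]

theorem mod_succ_self (k : Int) (hk : 2 ≤ k) : PySem.Int.mod (k + 1) k = 1 := by
  rw [PySem.Int.mod_eq_emod_of_pos (by omega),
    show k + 1 = 1 + k * 1 by ring, Int.add_mul_emod_self_left,
    Int.emod_eq_of_lt (by omega) (by omega)]

theorem all_mem_of_fixpoint (n : Int) (hn : 3 ≤ n) (s : List Int) (hmem : n ∈ s)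
    (hfix : ∀ a, a ∈ pvBody n s → a ∈ s) : ∀ k, 2 ≤ k → k ≤ n → k ∈ s := by
  have key : ∀ d : Nat, ∀ k, 2 ≤ k → k ≤ n → n - k ≤ (d : Int) → k ∈ s := by
    intro d
    induction d with
    | zero =>
      intro k h2 hk hd
      have : k = n := by omega
      rw [this]; exact hmem
    | succ d ih =>
      intro k h2 hk hd
      by_cases hkn : k = n
      · rw [hkn]; exact hmem
      · have hk1 : k + 1 ∈ s := ih (k + 1) (by omega) (by omega) (by omega)
        apply hfix
        rw [mem_pvBody]
        exact Or.inr ⟨k + 1, hk1, by omega, by omega, mod_succ_self k h2⟩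
  intro k h2 hk
  exact key (n - 2).toNat k h2 hk (by omega)

theorem pvLoop_main (n : Int) (hn : 3 ≤ n) : ∀ (fuel : Nat) (s : PySem.Set Int),
    n ∈ s → (∀ a ∈ s, 2 ≤ a ∧ a ≤ n) → s.Nodup → n.toNat ≤ fuel + s.length →
    pvLoop fuel n s = n - 1 := by
  intro fuel
  induction fuel with
  | zero =>
    intro s h1 h2 h3 h4
    exfalso
    have := length_le_of_bounded n (by omega) s h3 h2
    omega
  | succ fuel ih =>
    intro s hmem hb hnd hfuel
    have hsubset : ∀ a ∈ s, a ∈ pvBody n s := fun a ha => (mem_pvBody n s a).mpr (Or.inl ha)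
    have hbb : ∀ a ∈ pvBody n s, 2 ≤ a ∧ a ≤ n := by
      intro a ha
      rw [mem_pvBody] at ha
      rcases ha with ha | ⟨x, _, h1a, h2a, hm⟩
      · exact hb a ha
      · refine ⟨?_, by omega⟩
        by_contra hc
        have ha1 : a = 1 := by omega
        rw [ha1, PySem.Int.mod_eq_emod_of_pos (by omega)] at hm
        omega
    have hndb := nodup_pvBody n s
    have hmemb : n ∈ pvBody n s := hsubset n hmem
    show (if s.length < (pvBody n s).length then pvLoop fuel n (pvBody n s) else (s.length : Int)) = n - 1
    by_cases hlt : s.length < (pvBody n s).length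
    · rw [if_pos hlt]
      exact ih (pvBody n s) hmemb hbb hndb (by omega)
    · rw [if_neg hlt]
      rw [not_lt] at hlt
      have heq := mem_iff_of_subset_length s (pvBody n s) hnd hndb hsubset hlt
      have hfix : ∀ a, a ∈ pvBody n s → a ∈ s := fun a ha => (heq a).mp ha
      have hall := all_mem_of_fixpoint n hn s hmem hfix
      have hfin : s.toFinset = Finset.Icc 2 n := by
        ext a
        rw [List.mem_toFinset, Finset.mem_Icc]
        constructor
        · intro h; exact hb a h
        · intro h; exact hall a h.1 h.2
      have hcard : s.length = (Finset.Icc (2 : Int) n).card := by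
        rw [← hfin, List.toFinset_card_of_nodup hnd]
      rw [Int.card_Icc] at hcard
      omega

theorem ofList_singleton (n : Int) : PySem.Set.ofList [n] = [n] := by
  apply PySem.Set.ofList_eq_self_of_nodup
  exact List.nodup_singleton n

theorem distinctIntegers_nonpos (n : Int) (hn : n ≤ 0) : distinctIntegers n = 1 := by
  have h0 : n.toNat = 0 := by omega
  have hr : PySem.List.pyRange 1 (n + 1) 1 = [] := PySem.List.pyRange_one_eq_nil (by omega)
  rw [distinctIntegers, h0, ofList_singleton]
  show (if [n].length < (pvBody n [n]).length then pvLoop 0 n (pvBody n [n]) else ((1 : Nat) : Int)) = 1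
  have hbody : pvBody n [n] = [n] := by
    unfold pvBody pvInner
    rw [ofList_singleton, hr]
    rfl
  rw [hbody]
  simp

-- ===== VERDICT (by name: the statement is the Claim_ definition above) =====
theorem distinctIntegers_spec : Claim_equal_distinctIntegers := by
  intro n _
  unfold Spec_distinctIntegers distinctIntegers_alt
  by_cases h3 : 3 ≤ n
  · rw [if_pos (by omega)]
    apply pvLoop_main n h3 (n.toNat + 1) _ (by simp) (by simp; omega) (by simp)
    simp
    omega
  · by_cases h1 : n = 1
    · rw [h1]; decide
    · by_cases h2 : n = 2
      · rw [h2]; decide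
      · have hn0 : n ≤ 0 := by omega
        rw [if_neg (by omega), distinctIntegers_nonpos n hn0]
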